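-- pv_equiv track=rewrite | github.com/CronoxAU/Euler | python/Problem23/problem23.py | generateListOfSums
-- ===== SOURCE A (Python) =====
-- def generateListOfSums(list, limit):
--   result = []
--   for i in range(0, len(list)):
--     for j in range(i, len(list)):
--         if(list[i]+list[j]) <= limit:
--             if list[i]+list[j] not in result:
--                 result.append(list[i]+list[j])
--         else:
--             break
--   return result
-- ===== SOURCE B (Python) =====
-- def generateListOfSums(list, limit):
--   # Iterate over suffixes of the input (no indices, no break): for each suffix,
--   # find the cut point n (length of the qualifying prefix), emit the whole row
--   # by slicing and mapping, then deduplicate once at the end (first occurrences).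
--   raw = []
--   xs = list
--   while xs:
--     h = xs[0]
--     n = 0
--     while n < len(xs) and h + xs[n] <= limit:
--       n += 1
--     raw += [h + x for x in xs[:n]]
--     xs = xs[1:]
--   return [s for s in dict.fromkeys(raw)]
-- ===== Notes on version B (the rewrite author's own statement) =====
-- stated objective: faster
-- what changed: B replaces A's index-based nested loop with break and interleaved 'not in' membership checks by iteration over suffixes of the list: for each suffix it computes the cut point of the qualifying prefix, emits the whole row by slice+map, and deduplicates once in a final dict.fromkeys pass, removing the O(r) list-membership scan from the inner loop.
import Mathlib
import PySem

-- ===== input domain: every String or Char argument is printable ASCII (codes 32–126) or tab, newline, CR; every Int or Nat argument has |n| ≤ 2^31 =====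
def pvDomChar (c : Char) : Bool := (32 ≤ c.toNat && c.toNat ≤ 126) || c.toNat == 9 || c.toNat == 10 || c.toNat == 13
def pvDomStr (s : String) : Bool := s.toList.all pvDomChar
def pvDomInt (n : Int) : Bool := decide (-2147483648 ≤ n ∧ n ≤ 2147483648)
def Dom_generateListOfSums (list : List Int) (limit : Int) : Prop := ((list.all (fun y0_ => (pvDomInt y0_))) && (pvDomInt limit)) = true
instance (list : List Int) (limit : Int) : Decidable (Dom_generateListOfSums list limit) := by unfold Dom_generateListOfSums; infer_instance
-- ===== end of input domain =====

-- B replaces A's index-based nested loop (break + interleaved 'not in' checks) by iteration over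
-- suffixes: per suffix a cut point, a whole row by slice+map, and one final dedup pass.

-- ===== PORT A =====
-- inner 'for j in range(i, len(list))' with its break; list[i]/list[j] have i,j < len, so getD is exact
def gInnerA (l : List Int) (limit : Int) (i : Nat) : List Nat → List Int → List Int
  | [], res => res
  | j :: js, res =>
    if l.getD i 0 + l.getD j 0 ≤ limit then
      gInnerA l limit i js
        (if res.contains (l.getD i 0 + l.getD j 0) then res
         else res ++ [l.getD i 0 + l.getD j 0])
    else res

def generateListOfSums (list : List Int) (limit : Int) : List Int :=
  (List.range list.length).foldl
    (fun res i => gInnerA list limit i (List.range' i (list.length - i)) res) []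

-- ===== PORT B =====
-- 'n = 0; while n < len(xs) and h + xs[n] <= limit: n += 1' — the cut point of the suffix xs
def cutB (h : Int) (limit : Int) : List Int → Nat
  | [] => 0
  | x :: r => if h + x ≤ limit then 1 + cutB h limit r else 0

-- 'while xs: … raw += [h + x for x in xs[:n]]; xs = xs[1:]' — loop over suffixes, raw accumulator
def rowsB (limit : Int) : List Int → List Int → List Int
  | [], raw => raw
  | h :: t, raw =>
      rowsB limit t (raw ++ ((h :: t).take (cutB h limit (h :: t))).map (fun x => h + x))

def generateListOfSums_alt (list : List Int) (limit : Int) : List Int :=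
  -- '[s for s in dict.fromkeys(raw)]' is PySem.List.dedup
  PySem.List.dedup (rowsB limit list [])

-- ===== PRECONDITION & SPEC =====
def Spec_generateListOfSums (list : List Int) (limit : Int) (out : List Int) : Prop := out = generateListOfSums_alt list limit
instance (list : List Int) (limit : Int) (out : List Int) : Decidable (Spec_generateListOfSums list limit out) := by unfold Spec_generateListOfSums; infer_instance

-- ===== CLAIM (what is proved, stated in full; the proofs are below) =====
def Claim_equal_generateListOfSums : Prop := ∀ (list : List Int) (limit : Int), Dom_generateListOfSums list limit → Spec_generateListOfSums list limit (generateListOfSums list limit)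

-- ===== LEMMAS AND PROOFS =====

-- rowsB prepends its accumulator
theorem rowsB_acc (limit : Int) (xs : List Int) (raw : List Int) :
    rowsB limit xs raw = raw ++ rowsB limit xs [] := by
  induction xs generalizing raw with
  | nil => simp [rowsB]
  | cons h t ih =>
    simp only [rowsB]
    rw [ih (raw ++ _), ih ([] ++ _)]
    simp

-- A's inner loop, with membership check removed, equals B's row (same sums, same order)
def rawInnerA (l : List Int) (limit : Int) (i : Nat) : List Nat → List Int → List Int
  | [], acc => acc
  | j :: js, acc =>
    if l.getD i 0 + l.getD j 0 ≤ limit then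
      rawInnerA l limit i js (acc ++ [l.getD i 0 + l.getD j 0])
    else acc

theorem rawInnerA_acc (l : List Int) (limit : Int) (i : Nat) (js : List Nat) (acc : List Int) :
    rawInnerA l limit i js acc = acc ++ rawInnerA l limit i js [] := by
  induction js generalizing acc with
  | nil => simp [rawInnerA]
  | cons j js ih =>
    simp only [rawInnerA]
    split
    · rw [ih (acc ++ _), ih ([] ++ _)]; simp
    · simp

-- interleaved inner loop = folding Set.add over the raw inner output
theorem gInnerA_eq (l : List Int) (limit : Int) (i : Nat) (js : List Nat) (res : List Int) :
    gInnerA l limit i js res = (rawInnerA l limit i js []).foldl PySem.Set.add res := by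
  induction js generalizing res with
  | nil => simp [gInnerA, rawInnerA]
  | cons j js ih =>
    simp only [gInnerA, rawInnerA]
    split
    · rw [ih, rawInnerA_acc l limit i js ([] ++ [l.getD i 0 + l.getD j 0]), List.foldl_append]
      congr 1
    · simp

-- the raw outer fold prepends its accumulator
theorem rawFold_acc (l : List Int) (limit : Int) (is : List Nat) (a : List Int) :
    is.foldl (fun acc i => rawInnerA l limit i (List.range' i (l.length - i)) acc) a
      = a ++ is.foldl (fun acc i => rawInnerA l limit i (List.range' i (l.length - i)) acc) [] := by
  induction is generalizing a with
  | nil => simp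
  | cons k ks ihk =>
    simp only [List.foldl_cons]
    rw [rawInnerA_acc l limit k _ a, ihk, ihk (rawInnerA l limit k (List.range' k (l.length - k)) [])]
    simp

-- A's raw inner loop on indices j..len-1 equals B's row on the suffix drop j
theorem rawInnerA_row (l : List Int) (limit : Int) (i : Nat) :
    ∀ k j, j + k = l.length → i ≤ j →
      rawInnerA l limit i (List.range' j k) []
        = ((l.drop j).take (cutB (l.getD i 0) limit (l.drop j))).map (fun x => l.getD i 0 + x) := by
  intro k
  induction k with
  | zero =>
    intro j hj _
    have h : l.drop j = [] := List.drop_eq_nil_of_le (by omega)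
    simp [rawInnerA, h]
  | succ k ih =>
    intro j hj hij
    have hjlt : j < l.length := by omega
    have hdrop : l.drop j = l[j] :: l.drop (j + 1) := List.drop_eq_getElem_cons hjlt
    have hget : l.getD j 0 = l[j] := by simp [List.getD_eq_getElem?_getD, hjlt]
    rw [List.range'_succ]
    simp only [rawInnerA]
    rw [hdrop]
    by_cases hle : l.getD i 0 + l.getD j 0 ≤ limit
    · rw [if_pos hle]
      rw [rawInnerA_acc, ih (j + 1) (by omega) (by omega)]
      simp only [cutB]
      rw [if_pos (by rw [← hget]; exact hle), Nat.add_comm 1, List.take_succ_cons, List.map_cons,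
        hget]
      simp
    · rw [if_neg hle]
      simp only [cutB]
      rw [if_neg (by rw [← hget]; exact hle)]
      simp

-- the raw outer fold over indices i..len-1 equals B's suffix loop on drop i
theorem rawOuter_eq_rowsB (l : List Int) (limit : Int) :
    ∀ k i, i + k = l.length →
      (List.range' i k).foldl (fun acc i => rawInnerA l limit i (List.range' i (l.length - i)) acc) []
        = rowsB limit (l.drop i) [] := by
  intro k
  induction k with
  | zero =>
    intro i hi
    have h : l.drop i = [] := List.drop_eq_nil_of_le (by omega)
    simp [h, rowsB]
  | succ k ih =>
    intro i hi
    have hilt : i < l.length := by omega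
    have hdrop : l.drop i = l[i] :: l.drop (i + 1) := List.drop_eq_getElem_cons hilt
    have hrow : rawInnerA l limit i (List.range' i (l.length - i)) []
        = ((l[i] :: l.drop (i+1)).take (cutB l[i] limit (l[i] :: l.drop (i+1)))).map
            (fun x => l[i] + x) := by
      have h := rawInnerA_row l limit i (l.length - i) i (by omega) (le_refl i)
      have hget : l.getD i 0 = l[i] := by simp [List.getD_eq_getElem?_getD, hilt]
      rw [h, hdrop, hget]
    rw [List.range'_succ]
    simp only [List.foldl_cons]
    rw [rawFold_acc, ih (i + 1) (by omega), hdrop]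
    simp only [rowsB]
    rw [hrow]
    conv_rhs => rw [rowsB_acc]
    simp

-- the whole interleaved A loop = folding Set.add over the whole raw list
theorem outerA_eq (l : List Int) (limit : Int) (is : List Nat) (res : List Int) :
    is.foldl (fun res i => gInnerA l limit i (List.range' i (l.length - i)) res) res
      = (is.foldl (fun acc i => rawInnerA l limit i (List.range' i (l.length - i)) acc) []).foldl
          PySem.Set.add res := by
  induction is generalizing res with
  | nil => simp
  | cons i is ih =>
    simp only [List.foldl_cons]
    rw [ih, gInnerA_eq]
    rw [rawFold_acc l limit is (rawInnerA l limit i (List.range' i (l.length - i)) []),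
      List.foldl_append]

-- ===== VERDICT (by name: the statement is the Claim_ definition above) =====
theorem generateListOfSums_spec : Claim_equal_generateListOfSums := by
  intro l limit _
  unfold Spec_generateListOfSums generateListOfSums generateListOfSums_alt
  rw [outerA_eq]
  rw [show List.range l.length = List.range' 0 l.length from by simp [List.range_eq_range']]
  rw [show (List.range' 0 l.length).foldl
        (fun acc i => rawInnerA l limit i (List.range' i (l.length - i)) acc) []
        = rowsB limit (l.drop 0) [] from rawOuter_eq_rowsB l limit l.length 0 (by omega)]
  simp only [List.drop_zero]
  rw [PySem.List.dedup_eq_ofList, PySem.Set.ofList_eq_foldl]
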